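-- pv_equiv track=rewrite | github.com/stephenchestnut/fbballer | draftvalues.py | abs_to_vorp
-- ===== SOURCE A (Python) =====
-- def abs_to_vorp(absval, k):
--     #convert "absolute" player values to "value over replacement player"
--     #vorp = abs_to_vorp(absval,k)
--     #replacement player is taken to be the (k+1)th by value
--
--     abscopy = list(absval)
--     abscopy.sort() #sorted least to highest valuable
--     if (k+1) > len(absval):
--         rpval = 0
--     else:
--         rpval = abscopy[-(k+1)]
--
--     vorp = [x-rpval for x in absval]
--     return vorp
-- ===== SOURCE B (Python) =====
-- def abs_to_vorp(absval, k):
--     # value over replacement player: subtract the (k+1)th-largest value,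
--     # found by 3-way quickselect instead of fully sorting the list
--     n = len(absval)
--     if k + 1 > n:
--         rpval = 0
--     else:
--         pos = -(k + 1)          # Python index into the ascending order
--         if pos < 0:
--             pos += n
--         rpval = _select(absval, pos)
--     return [x - rpval for x in absval]
--
--
-- def _select(xs, i):
--     # i-th smallest (0-based) element of xs by 3-way quickselect
--     while True:
--         pivot = xs[len(xs) // 2]
--         lo = [x for x in xs if x < pivot]
--         if i < len(lo):
--             xs = lo
--             continue
--         hi = [x for x in xs if x > pivot]
--         neq = len(xs) - len(hi)
--         if i < neq:
--             return pivot
--         xs = hi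
--         i -= neq
-- ===== Notes on version B (the rewrite author's own statement) =====
-- stated objective: alternative
-- what changed: Replaces the full ascending sort + negative-index lookup with a 3-way quickselect (middle-element pivot) that finds the replacement value directly, then subtracts it in one pass.
import Mathlib
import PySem

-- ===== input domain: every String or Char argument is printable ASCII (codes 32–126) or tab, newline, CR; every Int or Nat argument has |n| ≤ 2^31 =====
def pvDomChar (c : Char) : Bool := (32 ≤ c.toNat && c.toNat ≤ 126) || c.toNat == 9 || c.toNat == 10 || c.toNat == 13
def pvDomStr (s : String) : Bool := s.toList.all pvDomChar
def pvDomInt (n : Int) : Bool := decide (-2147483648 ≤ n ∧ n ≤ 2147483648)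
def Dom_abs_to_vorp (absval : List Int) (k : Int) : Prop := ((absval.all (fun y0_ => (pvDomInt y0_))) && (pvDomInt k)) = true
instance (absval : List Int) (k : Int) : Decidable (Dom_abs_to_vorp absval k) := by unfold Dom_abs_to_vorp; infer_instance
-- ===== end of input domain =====

-- B replaces A's full sort with a 3-way quickselect of the replacement value (an alternative
-- selection algorithm; equal return value on Pre_).

-- ===== PORT A =====
-- literal port: copy, sort ascending, rpval = abscopy[-(k+1)] (Python index; none = IndexError,
-- excluded by Pre_), then subtract from every entry
def abs_to_vorp (absval : List Int) (k : Int) : List Int :=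
  let abscopy := PySem.List.sorted absval (fun x => x)
  let rpval : Int :=
    if (absval.length : Int) < k + 1 then 0
    else (PySem.List.pyGet? abscopy (-(k + 1))).getD 0
  absval.map (fun x => x - rpval)

-- ===== PORT B =====
-- pivot = xs[len(xs)//2] in _select (Source B)
def pvPivot (xs : List Int) : Int := xs.getD (xs.length / 2) 0

lemma pvPivot_mem (xs : List Int) (h : xs ≠ []) : pvPivot xs ∈ xs := by
  have hlt : xs.length / 2 < xs.length :=
    Nat.div_lt_self (List.length_pos_of_ne_nil h) one_lt_two
  rw [pvPivot, List.getD_eq_getElem _ _ hlt]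
  exact List.getElem_mem hlt

-- _select of Source B: the while-loop as tail recursion; Python raises IndexError on [] (unreachable
-- under Pre_), the port returns 0 there
def pvSelect (xs : List Int) (i : Int) : Int :=
  if hne : xs = [] then 0
  else
    if i < ((xs.filter (fun x => decide (x < pvPivot xs))).length : Int) then
      pvSelect (xs.filter (fun x => decide (x < pvPivot xs))) i
    else if i < (xs.length : Int) - ((xs.filter (fun x => decide (pvPivot xs < x))).length : Int) then
      pvPivot xs
    else
      pvSelect (xs.filter (fun x => decide (pvPivot xs < x)))
        (i - ((xs.length : Int) - ((xs.filter (fun x => decide (pvPivot xs < x))).length : Int)))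
termination_by xs.length
decreasing_by
  · rw [List.unattach_filter (g := fun x => decide (x < pvPivot xs)) (hf := fun x h => rfl),
      List.unattach_attach]
    exact List.length_filter_lt_length_iff_exists.2 ⟨pvPivot xs, pvPivot_mem xs hne, by simp⟩
  · rw [List.unattach_filter (g := fun x => decide (pvPivot xs < x)) (hf := fun x h => rfl),
      List.unattach_attach]
    exact List.length_filter_lt_length_iff_exists.2 ⟨pvPivot xs, pvPivot_mem xs hne, by simp⟩

def abs_to_vorp_alt (absval : List Int) (k : Int) : List Int :=
  let n : Int := absval.length
  let rpval : Int :=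
    if n < k + 1 then 0
    else pvSelect absval (if -(k + 1) < 0 then -(k + 1) + n else -(k + 1))
  absval.map (fun x => x - rpval)

-- ===== PRECONDITION & SPEC =====
-- Pre_ excludes exactly the inputs where A raises IndexError: k so negative that the
-- (non-negative) index -(k+1) is ≥ len(absval); B also raises there.
def Pre_abs_to_vorp (absval : List Int) (k : Int) : Prop := -(absval.length : Int) ≤ k
instance (absval : List Int) (k : Int) : Decidable (Pre_abs_to_vorp absval k) := by
  unfold Pre_abs_to_vorp; infer_instance

def pvWitness_abs_to_vorp : List Int × Int := ([3, 1, 2], 0)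

def Spec_abs_to_vorp (absval : List Int) (k : Int) (out : List Int) : Prop :=
  out = abs_to_vorp_alt absval k
instance (absval : List Int) (k : Int) (out : List Int) : Decidable (Spec_abs_to_vorp absval k out) := by
  unfold Spec_abs_to_vorp; infer_instance

-- ===== CLAIM (what is proved, stated in full; the proofs are below) =====
def Claim_equal_abs_to_vorp : Prop :=
  ∀ (absval : List Int) (k : Int), Dom_abs_to_vorp absval k → Pre_abs_to_vorp absval k →
    Spec_abs_to_vorp absval k (abs_to_vorp absval k)

-- ===== LEMMAS AND PROOFS =====

-- helpers to insert the head of a cons into the middle/right block of a three-way split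
lemma pv_cons_mid (a : Int) (t A B C : List Int) (ih : t.Perm (A ++ B ++ C)) :
    (a :: t).Perm (A ++ (a :: B) ++ C) := by
  refine (ih.cons a).trans ?_
  simpa [List.append_assoc] using
    (List.perm_middle (a := a) (l₁ := A) (l₂ := B ++ C)).symm

lemma pv_cons_right (a : Int) (t A B C : List Int) (ih : t.Perm (A ++ B ++ C)) :
    (a :: t).Perm (A ++ B ++ (a :: C)) := by
  refine (ih.cons a).trans ?_
  simpa [List.append_assoc] using
    (List.perm_middle (a := a) (l₁ := A ++ B) (l₂ := C)).symm

-- xs is a permutation of its <p / =p / >p filters concatenated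
lemma pv_perm3 (p : Int) (xs : List Int) :
    xs.Perm (xs.filter (fun x => decide (x < p)) ++ xs.filter (fun x => decide (x = p)) ++
      xs.filter (fun x => decide (p < x))) := by
  induction xs with
  | nil => simp
  | cons a t ih =>
    rcases lt_trichotomy a p with h | h | h
    · have h2 : ¬ a = p := by omega
      have h3 : ¬ p < a := by omega
      simp only [List.filter_cons, decide_eq_true_eq, if_pos h, if_neg h2, if_neg h3,
        List.cons_append]
      exact ih.cons a
    · have h1 : ¬ a < p := by omega
      have h3 : ¬ p < a := by omega
      simp only [List.filter_cons, decide_eq_true_eq, if_neg h1, if_pos h, if_neg h3]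
      exact pv_cons_mid a t _ _ _ ih
    · have h1 : ¬ a < p := by omega
      have h2 : ¬ a = p := by omega
      simp only [List.filter_cons, decide_eq_true_eq, if_neg h1, if_neg h2, if_pos h]
      exact pv_cons_right a t _ _ _ ih

-- sorted(xs) splits as sorted(lo) ++ eq ++ sorted(hi) at any pivot p
lemma pv_sorted3 (p : Int) (xs : List Int) :
    PySem.List.sorted xs (fun x => x) =
      PySem.List.sorted (xs.filter (fun x => decide (x < p))) (fun x => x) ++
      xs.filter (fun x => decide (x = p)) ++
      PySem.List.sorted (xs.filter (fun x => decide (p < x))) (fun x => x) := by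
  apply PySem.List.sorted_id_eq_of_perm_of_pairwise
  · exact ((((PySem.List.sorted_perm _ _ _).append (List.Perm.refl _)).append
      (PySem.List.sorted_perm _ _ _)).trans (pv_perm3 p xs).symm)
  · rw [List.pairwise_append, List.pairwise_append]
    refine ⟨⟨PySem.List.sorted_pairwise _ _, ?_, ?_⟩, PySem.List.sorted_pairwise _ _, ?_⟩
    · refine List.pairwise_of_forall_mem_list ?_
      intro a ha b hb
      have ha' := List.mem_filter.1 ha
      have hb' := List.mem_filter.1 hb
      simp only [decide_eq_true_eq] at ha' hb'
      omega
    · intro a ha b hb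
      have ha' := List.mem_filter.1 ((PySem.List.mem_sorted _ _ _ _).1 ha)
      have hb' := List.mem_filter.1 hb
      simp only [decide_eq_true_eq] at ha' hb'
      omega
    · intro a ha b hb
      have hb' := List.mem_filter.1 ((PySem.List.mem_sorted _ _ _ _).1 hb)
      rcases List.mem_append.1 ha with ha | ha
      · have ha' := List.mem_filter.1 ((PySem.List.mem_sorted _ _ _ _).1 ha)
        simp only [decide_eq_true_eq] at ha' hb'
        omega
      · have ha' := List.mem_filter.1 ha
        simp only [decide_eq_true_eq] at ha' hb'
        omega

-- quickselect computes the i-th entry of the ascending sort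
lemma pvSelect_sorted (n : Nat) : ∀ (xs : List Int), xs.length = n → ∀ i : Int, 0 ≤ i →
    i < (xs.length : Int) →
    pvSelect xs i = (PySem.List.sorted xs (fun x => x)).getD i.toNat 0 := by
  induction n using Nat.strong_induction_on with
  | _ n IH =>
    intro xs hn i h0 h1
    have hne : xs ≠ [] := by
      intro h; subst h; simp at h1; omega
    set p := pvPivot xs with hpdef
    set lo := xs.filter (fun x => decide (x < p)) with hlo
    set eqs := xs.filter (fun x => decide (x = p)) with heq
    set hi := xs.filter (fun x => decide (p < x)) with hhi
    have hlen : xs.length = lo.length + eqs.length + hi.length := by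
      have h' := (pv_perm3 p xs).length_eq
      rw [← hlo, ← heq, ← hhi] at h'
      simp only [List.length_append] at h'
      omega
    have hlolt : lo.length < xs.length :=
      List.length_filter_lt_length_iff_exists.2 ⟨p, pvPivot_mem xs hne, by simp⟩
    have hhilt : hi.length < xs.length :=
      List.length_filter_lt_length_iff_exists.2 ⟨p, pvPivot_mem xs hne, by simp⟩
    rw [pvSelect, dif_neg hne, pv_sorted3 p xs, ← hpdef, ← hlo, ← heq, ← hhi]
    by_cases hc1 : i < (lo.length : Int)
    · rw [if_pos hc1]
      have hi1 : i.toNat < (PySem.List.sorted lo (fun x => x)).length := by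
        rw [PySem.List.length_sorted]; omega
      rw [List.getD_append _ _ _ _ (by
            rw [List.length_append, PySem.List.length_sorted]; omega),
          List.getD_append _ _ _ _ hi1]
      exact IH lo.length (by omega) lo rfl i h0 (by omega)
    · rw [if_neg hc1]
      by_cases hc2 : i < (xs.length : Int) - (hi.length : Int)
      · rw [if_pos hc2]
        have hj : i.toNat - lo.length < eqs.length := by omega
        rw [List.getD_append _ _ _ _ (by
              rw [List.length_append, PySem.List.length_sorted]; omega),
            List.getD_append_right _ _ _ _ (by rw [PySem.List.length_sorted]; omega),
            PySem.List.length_sorted, List.getD_eq_getElem _ _ hj]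
        have hmem : eqs[i.toNat - lo.length] ∈ xs.filter (fun x => decide (x = p)) := by
          rw [← heq]; exact List.getElem_mem hj
        have := (List.mem_filter.1 hmem).2
        simp only [decide_eq_true_eq] at this
        exact this.symm
      · rw [if_neg hc2]
        have hlen2 : (lo.length : Int) + eqs.length ≤ i := by omega
        rw [List.getD_append_right _ _ _ _ (by
              rw [List.length_append, PySem.List.length_sorted]; omega)]
        have harg : (i - ((xs.length : Int) - (hi.length : Int))).toNat
            = i.toNat - ((PySem.List.sorted lo (fun x => x)) ++ eqs).length := by
          rw [List.length_append, PySem.List.length_sorted]; omega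
        rw [← harg]
        exact IH hi.length (by omega) hi rfl _ (by omega) (by omega)

-- ===== VERDICT (by name: the statement is the Claim_ definition above) =====
theorem abs_to_vorp_spec : Claim_equal_abs_to_vorp := by
  intro absval k _ hpre
  unfold Pre_abs_to_vorp at hpre
  show abs_to_vorp absval k = abs_to_vorp_alt absval k
  unfold abs_to_vorp abs_to_vorp_alt
  by_cases hk : (absval.length : Int) < k + 1
  · simp only [if_pos hk]
  · simp only [if_neg hk]
    have hr : (PySem.List.pyGet? (PySem.List.sorted absval (fun x => x)) (-(k + 1))).getD 0
        = pvSelect absval (if -(k + 1) < 0 then -(k + 1) + (absval.length : Int) else -(k + 1)) := by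
      by_cases hkn : -(k + 1) < 0
      · rw [if_pos hkn,
          pvSelect_sorted absval.length absval rfl _ (by omega) (by omega)]
        simp only [PySem.List.pyGet?, PySem.List.pyIdx?, PySem.List.length_sorted,
          if_neg (by omega : ¬ (0:Int) ≤ -(k + 1)), if_pos (by omega : -(absval.length : Int) ≤ -(k + 1))]
        rw [Option.bind_some, List.getD_eq_getElem?_getD,
          (by omega : (-(k + 1) + (absval.length : Int)).toNat
            = absval.length - (- -(k + 1)).toNat)]
      · rw [if_neg hkn,
          pvSelect_sorted absval.length absval rfl _ (by omega) (by omega)]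
        simp only [PySem.List.pyGet?, PySem.List.pyIdx?, PySem.List.length_sorted,
          if_pos (by omega : (0:Int) ≤ -(k + 1)), if_pos (by omega : -(k + 1) < (absval.length : Int))]
        rw [Option.bind_some, List.getD_eq_getElem?_getD]
    rw [hr]
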